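-- pv_equiv track=rewrite | github.com/maknapik/PythonStudyCourse2018 | Zad1/expression.py | variableAmount
-- ===== SOURCE A (Python) =====
-- OPS = ["&", "|", "<=>", "!", "=>", "xor"]
--
-- def variableAmount(expr):
--     count = 0
--     vars = []
--     for el in expr:
--         if el != "(" and el != ")" and el not in OPS and el not in vars:
--             count += 1
--             vars.append(el)
--     return count
-- ===== SOURCE B (Python) =====
-- OPS = ["&", "|", "<=>", "!", "=>", "xor"]
--
-- def variableAmount(expr):
--     # Sort the tokens first, then count run-starts (element differs from its
--     # predecessor) that are neither parentheses nor operators: in a sorted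
--     # list, run-starts are exactly the distinct elements.
--     s = sorted(expr)
--     count = 0
--     prev = None
--     for el in s:
--         if el != prev and el != "(" and el != ")" and el not in OPS:
--             count += 1
--         prev = el
--     return count
-- ===== Notes on version B (the rewrite author's own statement) =====
-- stated objective: faster
-- what changed: Replaced A's single pass that maintains a seen-list and linearly scans it per element by a sort-then-scan: sort the tokens, then count run-starts (element differs from its predecessor) that are not parentheses or operators.
import Mathlib
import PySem

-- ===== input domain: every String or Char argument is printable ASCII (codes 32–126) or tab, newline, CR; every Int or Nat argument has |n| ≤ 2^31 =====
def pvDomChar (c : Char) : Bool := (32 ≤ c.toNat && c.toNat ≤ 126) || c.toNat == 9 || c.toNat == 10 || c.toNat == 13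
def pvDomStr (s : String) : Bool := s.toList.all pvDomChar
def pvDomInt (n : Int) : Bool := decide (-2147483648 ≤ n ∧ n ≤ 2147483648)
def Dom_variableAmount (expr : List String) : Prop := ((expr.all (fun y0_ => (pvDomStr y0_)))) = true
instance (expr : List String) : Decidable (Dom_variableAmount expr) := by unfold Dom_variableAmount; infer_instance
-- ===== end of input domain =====

-- B replaces A's per-element seen-list scan by sort-then-scan (count run-starts
-- of the sorted token list that are not parentheses/operators); alternative
-- decomposition, return values proved equal.

-- ===== PORT A =====
def pvOPS : List String := ["&", "|", "<=>", "!", "=>", "xor"]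

def variableAmount (expr : List String) : Int :=
  (expr.foldl
    (fun (st : Int × List String) el =>
      if el != "(" && el != ")" && !(pvOPS.contains el) && !(st.2.contains el)
      then (st.1 + 1, st.2 ++ [el])
      else st)
    ((0 : Int), ([] : List String))).1

-- ===== PORT B =====
-- B's loop state is (count, prev); Python's 'el != prev' with prev = None is
-- always True, modelled by prev : Option String and 'some el != prev'.
def pvStepB (st : Int × Option String) (el : String) : Int × Option String :=
  (if some el != st.2 && el != "(" && el != ")" && !(pvOPS.contains el)
   then st.1 + 1 else st.1, some el)

def variableAmount_alt (expr : List String) : Int :=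
  ((PySem.List.sorted expr (fun x => x) false).foldl pvStepB
    ((0 : Int), (none : Option String))).1

-- ===== PRECONDITION & SPEC =====
def Spec_variableAmount (expr : List String) (out : Int) : Prop := out = variableAmount_alt expr
instance (expr : List String) (out : Int) : Decidable (Spec_variableAmount expr out) := by unfold Spec_variableAmount; infer_instance

-- ===== CLAIM (what is proved, stated in full; the proofs are below) =====
def Claim_equal_variableAmount : Prop := ∀ (expr : List String), Dom_variableAmount expr → Spec_variableAmount expr (variableAmount expr)

-- ===== LEMMAS AND PROOFS =====

-- the keep predicate of both branches (everything but parentheses and operators)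
def pvKeep (el : String) : Bool := el != "(" && el != ")" && !(pvOPS.contains el)

-- the common yardstick: number of distinct kept tokens, as a Finset card
def pvF (t : List String) : Int :=
  ((t.toFinset.filter (fun y => pvKeep y = true)).card : Int)

theorem pvF_cons (x : String) (xs : List String) :
    pvF (x :: xs) = pvF xs + (if x ∉ xs ∧ pvKeep x = true then 1 else 0) := by
  unfold pvF
  rw [List.toFinset_cons, Finset.filter_insert]
  by_cases hk : pvKeep x = true
  · by_cases hm : x ∈ xs
    · have : x ∈ xs.toFinset.filter (fun y => pvKeep y = true) := by
        simp [List.mem_toFinset, hm, hk]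
      simp [hk, hm, Finset.insert_eq_self.mpr this]
    · have : x ∉ xs.toFinset.filter (fun y => pvKeep y = true) := by
        simp [List.mem_toFinset, hm]
      simp [hk, hm, Finset.card_insert_of_notMem this]
  · simp [hk]

-- A's loop state after consuming expr is (|v|, v) with v the kept first occurrences
theorem pv_loopA (expr : List String) :
    expr.foldl
      (fun (st : Int × List String) el =>
        if el != "(" && el != ")" && !(pvOPS.contains el) && !(st.2.contains el)
        then (st.1 + 1, st.2 ++ [el])
        else st)
      ((0 : Int), ([] : List String))
    = ((((PySem.Set.ofList expr).filter pvKeep).length : Int),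
        (PySem.Set.ofList expr).filter pvKeep) := by
  induction expr using List.reverseRecOn with
  | nil => rfl
  | append_singleton xs x ih =>
    rw [List.foldl_append, ih, PySem.Set.ofList_append_singleton]
    simp only [List.foldl_cons, List.foldl_nil]
    have hcond : ∀ (v : List String),
        (x != "(" && x != ")" && !(pvOPS.contains x) && !(v.contains x))
          = (pvKeep x && !(v.contains x)) := fun _ => rfl
    rw [hcond]
    by_cases hk : pvKeep x = true
    · by_cases hm : x ∈ PySem.Set.ofList xs
      · have hmem : x ∈ (PySem.Set.ofList xs).filter pvKeep :=
          List.mem_filter.mpr ⟨hm, hk⟩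
        rw [PySem.Set.add_of_mem hm]
        simp [hk]
        simpa using hm
      · rw [PySem.Set.add_of_not_mem hm]
        simp [hk, List.filter_append]
        simpa using hm
    · have hk' : pvKeep x = false := by simpa using hk
      by_cases hm : x ∈ PySem.Set.ofList xs
      · rw [PySem.Set.add_of_mem hm]
        simp [hk']
      · rw [PySem.Set.add_of_not_mem hm]
        simp [hk', List.filter_append]

-- A's count is the number of distinct kept tokens
theorem pvA_eq_F (expr : List String) : variableAmount expr = pvF expr := by
  unfold variableAmount
  rw [pv_loopA]
  unfold pvF
  have hnd : ((PySem.Set.ofList expr).filter pvKeep).Nodup :=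
    (PySem.Set.nodup_ofList expr).filter _
  rw [← List.toFinset_card_of_nodup hnd, List.toFinset_filter]
  have : (PySem.Set.ofList expr).toFinset = expr.toFinset := by
    ext y; simp [List.mem_toFinset, PySem.Set.mem_ofList]
  rw [this]

-- the correction term: 1 if prev is a kept element still occurring in the rest
def pvAdj (p : Option String) (s : List String) : Int :=
  match p with
  | none => 0
  | some q => if q ∈ s ∧ pvKeep q = true then 1 else 0

-- B's scan of a sorted suffix counts the distinct kept tokens of that suffix,
-- minus 1 when prev's own run continues into the suffix
theorem pv_foldB : ∀ (s : List String), s.Pairwise (fun a b => a ≤ b) →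
    ∀ (c : Int) (p : Option String), (∀ q, p = some q → ∀ x ∈ s, q ≤ x) →
    (s.foldl pvStepB (c, p)).1 = c + pvF s - pvAdj p s := by
  intro s
  induction s with
  | nil => intro _ c p _; cases p <;> simp [pvAdj, pvF]
  | cons x xs ih =>
    intro hpw c p hle
    have hxle : ∀ y ∈ xs, x ≤ y := fun y hy => (List.pairwise_cons.mp hpw).1 y hy
    have hxs : xs.Pairwise (fun a b => a ≤ b) := (List.pairwise_cons.mp hpw).2
    rw [List.foldl_cons, pvF_cons]
    have hstep : pvStepB (c, p) x
        = (if some x ≠ p ∧ pvKeep x = true then c + 1 else c, some x) := by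
      unfold pvStepB pvKeep
      by_cases hp : some x ≠ p <;> by_cases hk : pvKeep x = true <;>
        simp_all [pvKeep]
    rw [hstep, ih hxs _ (some x) (by intro q hq y hy; cases hq; exact hxle y hy)]
    cases p with
    | none =>
      simp only [pvAdj]
      by_cases hk : pvKeep x = true <;> by_cases hm : x ∈ xs <;>
        simp [hk, hm] <;> ring
    | some q =>
      by_cases hqx : q = x
      · subst hqx
        simp only [pvAdj, ne_eq, not_true_eq_false, false_and, if_false,
          List.mem_cons, true_or, true_and]
        by_cases hk : pvKeep q = true <;> by_cases hm : q ∈ xs <;>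
          simp [hk, hm] <;> ring
      · have hqnot : q ∉ xs := by
          intro hmem
          have h1 : q ≤ x := hle q rfl x (List.mem_cons_self)
          have h2 : x ≤ q := hxle q hmem
          exact hqx (le_antisymm h1 h2)
        have hadj : pvAdj (some q) (x :: xs) = 0 := by
          simp [pvAdj, List.mem_cons, hqx, hqnot]
        rw [hadj]
        simp only [pvAdj, ne_eq, Option.some.injEq]
        by_cases hk : pvKeep x = true <;> by_cases hm : x ∈ xs <;>
          simp [hk, hm, Ne.symm hqx] <;> ring

-- sorting does not change the distinct-token Finset
theorem pvF_sorted (expr : List String) :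
    pvF (PySem.List.sorted expr (fun x => x) false) = pvF expr := by
  unfold pvF
  rw [List.toFinset_eq_of_perm _ _ (PySem.List.sorted_perm expr (fun x => x) false)]

-- ===== VERDICT (by name: the statement is the Claim_ definition above) =====
theorem variableAmount_spec : Claim_equal_variableAmount := by
  intro expr _
  unfold Spec_variableAmount variableAmount_alt
  rw [pvA_eq_F,
    pv_foldB _ (PySem.List.sorted_pairwise expr (fun x => x)) 0 none
      (by intro q hq; cases hq)]
  simp [pvAdj, pvF_sorted]
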